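-- pv_equiv track=rewrite | github.com/Ershivnandan/python-series | nextSmallerOfNextGreater.py | nextSmallerOfNextGreater
-- ===== SOURCE A (Python) =====
-- def nextSmallerOfNextGreater(arr, n):
--
--
--   nge = [-1] * n
--   stack = []
--
--   for i in range(n):
--     while stack and arr[stack[-1]] < arr[i]:
--       nge[stack.pop()] = i
--     stack.append(i)
--
--   result = [-1] * n
--
--   for i in range(n):
--     if nge[i] != -1:
--       j = nge[i]
--       for k in range(j + 1, n):
--         if arr[k] < arr[j]:
--           result[i] = arr[k]
--           break
--
--   return result
-- ===== SOURCE B (Python) =====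
-- def nextSmallerOfNextGreater(arr, n):
--     # next-greater index for each i (monotonic stack), then O(n) next-smaller
--     # value for each index via a backward stack; answer is nsv[nge[i]].
--     nge = [-1] * n
--     stack = []
--     for i in range(n):
--         while stack and arr[stack[-1]] < arr[i]:
--             nge[stack.pop()] = i
--         stack.append(i)
--
--     nsv = []            # built back-to-front: nsv[j] = first value after j smaller than arr[j]
--     vstack = []
--     for j in range(n - 1, -1, -1):
--         x = arr[j]
--         while vstack and vstack[-1] >= x:
--             vstack.pop()
--         nsv.append(vstack[-1] if vstack else -1)
--         vstack.append(x)
--     nsv.reverse()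
--
--     return [nsv[g] if g != -1 else -1 for g in nge]
-- ===== Notes on version B (the rewrite author's own statement) =====
-- stated objective: alternative
-- what changed: A finds each result by rescanning the array after nge[i] for every index (worst-case quadratic nested scans); B instead precomputes every next-smaller value in one backward monotonic-stack pass and just indexes nsv[nge[i]].
-- outside the precondition, e.g. on nextSmallerOfNextGreater([], 1): A returns [-1], B raises IndexError
import Mathlib
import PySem

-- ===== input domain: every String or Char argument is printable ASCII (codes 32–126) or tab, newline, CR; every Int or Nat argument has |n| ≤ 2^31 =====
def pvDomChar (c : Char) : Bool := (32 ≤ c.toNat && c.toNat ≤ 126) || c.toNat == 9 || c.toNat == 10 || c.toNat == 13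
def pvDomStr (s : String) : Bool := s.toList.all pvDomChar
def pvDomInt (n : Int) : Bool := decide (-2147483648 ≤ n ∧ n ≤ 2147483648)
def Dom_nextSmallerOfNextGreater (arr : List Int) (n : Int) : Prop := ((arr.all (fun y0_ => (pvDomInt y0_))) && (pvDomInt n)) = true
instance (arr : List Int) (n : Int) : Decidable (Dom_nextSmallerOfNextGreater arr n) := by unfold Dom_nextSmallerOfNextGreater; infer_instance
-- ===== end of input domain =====

-- B replaces A's per-index inner rescan (for each i, scan the array after nge[i]) by a single
-- backward monotonic-stack pass computing every next-smaller value once; objective: alternative.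

-- ===== PORT A =====
-- inner 'while stack and arr[stack[-1]] < arr[i]: nge[stack.pop()] = i' (stack head = Python stack top)
def pvAWhile (arr : List Int) (i : Int) : List Int → List Int → List Int × List Int
  | nge, [] => (nge, [])
  | nge, t :: st =>
      if PySem.List.pyGetD arr t 0 < PySem.List.pyGetD arr i 0 then
        pvAWhile arr i (PySem.List.pySetD nge t i) st
      else (nge, t :: st)

-- first pass: nge = [-1]*n; for i in range(n): while …; stack.append(i)
def pvANge (arr : List Int) (n : Int) : List Int :=
  ((PySem.List.pyRange 0 n 1).foldl
    (fun s i =>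
      let s' := pvAWhile arr i s.1 s.2
      (s'.1, i :: s'.2))
    (List.replicate n.toNat (-1), [])).1

-- inner 'for k in range(j+1, n): if arr[k] < arr[j]: result[i] = arr[k]; break'
def pvAScan (arr : List Int) (j : Int) (res : List Int) (i : Int) : List Int → List Int
  | [] => res
  | k :: ks =>
      if PySem.List.pyGetD arr k 0 < PySem.List.pyGetD arr j 0 then
        PySem.List.pySetD res i (PySem.List.pyGetD arr k 0)
      else pvAScan arr j res i ks

-- body of the second 'for i in range(n)' loop
def pvAStep (arr : List Int) (n : Int) (nge : List Int) (res : List Int) (i : Int) : List Int :=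
  let g := PySem.List.pyGetD nge i (-1)
  if g ≠ -1 then pvAScan arr g res i (PySem.List.pyRange (g + 1) n 1) else res

def nextSmallerOfNextGreater (arr : List Int) (n : Int) : List Int :=
  let nge := pvANge arr n
  (PySem.List.pyRange 0 n 1).foldl (pvAStep arr n nge) (List.replicate n.toNat (-1))

-- ===== PORT B =====
-- same first pass as Source B's (identical to A's first loop in the Python too)
def pvBWhile (arr : List Int) (i : Int) : List Int → List Int → List Int × List Int
  | nge, [] => (nge, [])
  | nge, t :: st =>
      if PySem.List.pyGetD arr t 0 < PySem.List.pyGetD arr i 0 then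
        pvBWhile arr i (PySem.List.pySetD nge t i) st
      else (nge, t :: st)

def pvBNge (arr : List Int) (n : Int) : List Int :=
  ((PySem.List.pyRange 0 n 1).foldl
    (fun s i =>
      let s' := pvBWhile arr i s.1 s.2
      (s'.1, i :: s'.2))
    (List.replicate n.toNat (-1), [])).1

-- 'while vstack and vstack[-1] >= x: vstack.pop()' (head = Python stack top)
def pvBPop (x : Int) : List Int → List Int
  | [] => []
  | v :: vs => if x ≤ v then pvBPop x vs else v :: vs

-- one iteration of Source B's backward loop: state = (nsv being appended to, vstack)
def pvBStep (arr : List Int) (s : List Int × List Int) (j : Int) : List Int × List Int :=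
  let x := PySem.List.pyGetD arr j 0
  let st := pvBPop x s.2
  (s.1 ++ [st.headD (-1)], x :: st)

-- 'for j in range(n-1, -1, -1): …' then 'nsv.reverse()'
def pvBBack (arr : List Int) (n : Int) : List Int :=
  (((PySem.List.pyRange (n - 1) (-1) (-1)).foldl (pvBStep arr) ([], [])).1).reverse

def nextSmallerOfNextGreater_alt (arr : List Int) (n : Int) : List Int :=
  let nsv := pvBBack arr n
  (pvBNge arr n).map (fun g => if g ≠ -1 then PySem.List.pyGetD nsv g (-1) else -1)

-- ===== PRECONDITION & SPEC =====
-- Pre_ excludes the inputs with n > len(arr): there A raises IndexError except in the one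
-- degenerate corner n = 1 with arr = [] (A never indexes arr and returns [-1], B's backward
-- pass raises IndexError like A does everywhere else beyond the array).
def Pre_nextSmallerOfNextGreater (arr : List Int) (n : Int) : Prop := n ≤ (arr.length : Int)
instance (arr : List Int) (n : Int) : Decidable (Pre_nextSmallerOfNextGreater arr n) := by
  unfold Pre_nextSmallerOfNextGreater; infer_instance

def pvWitness_nextSmallerOfNextGreater : List Int × Int := ([2, 1, 5, 0, 3], 5)

def Spec_nextSmallerOfNextGreater (arr : List Int) (n : Int) (out : List Int) : Prop := out = nextSmallerOfNextGreater_alt arr n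
instance (arr : List Int) (n : Int) (out : List Int) : Decidable (Spec_nextSmallerOfNextGreater arr n out) := by unfold Spec_nextSmallerOfNextGreater; infer_instance

-- ===== CLAIM (what is proved, stated in full; the proofs are below) =====
def Claim_equal_nextSmallerOfNextGreater : Prop := ∀ (arr : List Int) (n : Int), Dom_nextSmallerOfNextGreater arr n → Pre_nextSmallerOfNextGreater arr n → Spec_nextSmallerOfNextGreater arr n (nextSmallerOfNextGreater arr n)

-- ===== LEMMAS AND PROOFS =====

-- the two (textually identical) first passes agree
theorem pvWhile_eq (arr : List Int) (i : Int) : ∀ st nge, pvBWhile arr i nge st = pvAWhile arr i nge st := by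
  intro st
  induction st with
  | nil => intro nge; rfl
  | cons t st ih =>
      intro nge
      simp only [pvBWhile, pvAWhile]
      split_ifs with h
      · exact ih _
      · rfl

theorem pvNge_eq (arr : List Int) (n : Int) : pvBNge arr n = pvANge arr n := by
  unfold pvBNge pvANge
  have h : (fun (s : List Int × List Int) (i : Int) =>
      let s' := pvBWhile arr i s.1 s.2; (s'.1, i :: s'.2)) =
      (fun (s : List Int × List Int) (i : Int) =>
      let s' := pvAWhile arr i s.1 s.2; (s'.1, i :: s'.2)) := by
    funext s i
    simp only [pvWhile_eq]
  rw [h]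

-- first value of ys smaller than x (−1 if none): the mathematical spec both passes compute
def pvFirstLt (x : Int) : List Int → Int
  | [] => -1
  | y :: ys => if y < x then y else pvFirstLt x ys

def pvHasLt (x : Int) (ys : List Int) : Bool := ys.any (fun y => decide (y < x))

def pvNsvSpec : List Int → List Int
  | [] => []
  | x :: xs => pvFirstLt x xs :: pvNsvSpec xs

theorem pvFirstLt_of_not_hasLt {x : Int} {ys : List Int} (h : pvHasLt x ys = false) : pvFirstLt x ys = -1 := by
  induction ys with
  | nil => rfl
  | cons y ys ih =>
      simp [pvHasLt] at h
      have h1 := h.1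
      have := ih (by simp [pvHasLt]; exact fun z hz => h.2 z hz)
      simp [pvFirstLt, this]
      omega

theorem pvHasLt_cons (x y : Int) (ys : List Int) :
    pvHasLt x (y :: ys) = (decide (y < x) || pvHasLt x ys) := by
  simp [pvHasLt]

theorem length_pvNsvSpec (l : List Int) : (pvNsvSpec l).length = l.length := by
  induction l with
  | nil => rfl
  | cons x xs ih => simp [pvNsvSpec, ih]

theorem pvNsvSpec_getD (l : List Int) : ∀ g : Nat, g < l.length →
    (pvNsvSpec l).getD g 0 = pvFirstLt (l.getD g 0) (l.drop (g + 1)) := by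
  induction l with
  | nil => intro g h; simp at h
  | cons x xs ih =>
      intro g h
      cases g with
      | zero => simp [pvNsvSpec]
      | succ g => simpa [pvNsvSpec] using ih g (by simpa using h)

-- popping with a larger bound first changes nothing visible to a smaller bound
theorem pvBPop_pvBPop {x y : Int} (h : y ≤ x) : ∀ st, pvBPop y (pvBPop x st) = pvBPop y st := by
  intro st
  induction st with
  | nil => rfl
  | cons v vs ih =>
      by_cases h1 : x ≤ v
      · rw [show pvBPop x (v :: vs) = pvBPop x vs from by simp [pvBPop, h1], ih,
            show pvBPop y (v :: vs) = pvBPop y vs from by simp only [pvBPop]; rw [if_pos (by omega)]]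
      · rw [show pvBPop x (v :: vs) = v :: vs from by simp [pvBPop, h1]]


theorem pvBPop_cons_pop {x v : Int} (vs : List Int) (h : x ≤ v) : pvBPop x (v :: vs) = pvBPop x vs := by
  rw [pvBPop, if_pos h]

theorem pvBPop_cons_stop {x v : Int} (vs : List Int) (h : ¬ x ≤ v) : pvBPop x (v :: vs) = v :: vs := by
  rw [pvBPop, if_neg h]

theorem pvFirstLt_cons_lt {x y : Int} (ys : List Int) (h : y < x) : pvFirstLt x (y :: ys) = y := by
  rw [pvFirstLt, if_pos h]

theorem pvFirstLt_cons_ge {x y : Int} (ys : List Int) (h : ¬ y < x) : pvFirstLt x (y :: ys) = pvFirstLt x ys := by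
  rw [pvFirstLt, if_neg h]

-- value the final result holds at a position whose nge-entry is g
def pvF (arr : List Int) (n : Int) (g : Int) : Int :=
  if g = -1 then -1
  else pvFirstLt ((arr.take n.toNat).getD g.toNat 0) ((arr.take n.toNat).drop (g.toNat + 1))

theorem pv_take_getD (arr : List Int) (N a : Nat) (ha : a < N) (hN : N ≤ arr.length) :
    (arr.take N).getD a 0 = arr.getD a 0 := by
  have h1 : a < (arr.take N).length := by simp; omega
  have h2 : a < arr.length := by omega
  rw [List.getD_eq_getElem _ _ h1, List.getD_eq_getElem _ _ h2, List.getElem_take]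

-- invariant of Source B's backward loop: the emitted list is the spec (reversed, being appended),
-- and the stack answers every "first smaller in the suffix" query
theorem pvBack_inv (arr : List Int) (n : Int) (hn0 : 0 ≤ n) (hn : n ≤ (arr.length : Int)) :
    ∀ (k a : Nat), a + k = n.toNat →
      (((PySem.List.pyRange (a : Int) n 1).reverse.foldl (pvBStep arr) ([], [])).1
        = (pvNsvSpec ((arr.take n.toNat).drop a)).reverse)
      ∧ ∀ x : Int,
          (pvBPop x (((PySem.List.pyRange (a : Int) n 1).reverse.foldl (pvBStep arr) ([], [])).2)).headD (-1)
            = pvFirstLt x ((arr.take n.toNat).drop a) := by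
  have hNlen : n.toNat ≤ arr.length := by omega
  have hlen : (arr.take n.toNat).length = n.toNat := by simp; omega
  intro k
  induction k with
  | zero =>
      intro a ha
      have h1 : PySem.List.pyRange (a : Int) n 1 = [] := by
        apply PySem.List.pyRange_one_eq_nil; omega
      have h2 : (arr.take n.toNat).drop a = [] := by
        apply List.drop_eq_nil_of_le; omega
      simp [h1, h2, pvNsvSpec, pvBPop, pvFirstLt]
  | succ k ih =>
      intro a ha
      have han : (a : Int) < n := by omega
      have haN : a < n.toNat := by omega
      have hcast : ((a : Int) + 1) = ((a + 1 : Nat) : Int) := by push_cast; ring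
      obtain ⟨ih1, ih2⟩ := ih (a + 1) (by omega)
      have hx : PySem.List.pyGetD arr (a : Int) 0 = (arr.take n.toNat).getD a 0 := by
        rw [PySem.List.pyGetD_natCast, pv_take_getD arr n.toNat a haN hNlen]
      have hdrop : (arr.take n.toNat).drop a
          = (arr.take n.toNat).getD a 0 :: (arr.take n.toNat).drop (a + 1) := by
        rw [List.getD_eq_getElem _ _ (by omega), List.drop_eq_getElem_cons (by omega)]
      have hsplit : (PySem.List.pyRange (a : Int) n 1).reverse
          = (PySem.List.pyRange ((a + 1 : Nat) : Int) n 1).reverse ++ [(a : Int)] := by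
        rw [PySem.List.pyRange_one_cons han, List.reverse_cons, hcast]
      rw [hsplit, List.foldl_append, List.foldl_cons, List.foldl_nil]
      have hstep : pvBStep arr
            (List.foldl (pvBStep arr) ([], []) (PySem.List.pyRange ((a + 1 : Nat) : Int) n 1).reverse) (a : Int)
          = ((List.foldl (pvBStep arr) ([], []) (PySem.List.pyRange ((a + 1 : Nat) : Int) n 1).reverse).1
               ++ [(pvBPop ((arr.take n.toNat).getD a 0)
                    (List.foldl (pvBStep arr) ([], []) (PySem.List.pyRange ((a + 1 : Nat) : Int) n 1).reverse).2).headD (-1)],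
             (arr.take n.toNat).getD a 0 :: pvBPop ((arr.take n.toNat).getD a 0)
                    (List.foldl (pvBStep arr) ([], []) (PySem.List.pyRange ((a + 1 : Nat) : Int) n 1).reverse).2) := by
        simp only [pvBStep, hx]
      rw [hstep]
      constructor
      · simp only [ih1, ih2]
        rw [hdrop]
        simp [pvNsvSpec]
      · intro y
        rw [hdrop]
        by_cases hyx : y ≤ (arr.take n.toNat).getD a 0
        · rw [pvBPop_cons_pop _ hyx, pvBPop_pvBPop hyx, ih2, pvFirstLt_cons_ge _ (by omega)]
        · rw [pvBPop_cons_stop _ hyx, List.headD_cons, pvFirstLt_cons_lt _ (by omega)]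

theorem pvBBack_eq (arr : List Int) (n : Int) (hn0 : 0 ≤ n) (hn : n ≤ (arr.length : Int)) :
    pvBBack arr n = pvNsvSpec (arr.take n.toNat) := by
  unfold pvBBack
  have h1 : PySem.List.pyRange (n - 1) (-1) (-1) = (PySem.List.pyRange 0 n 1).reverse := by
    rw [PySem.List.pyRange_neg_one_eq_reverse]
    norm_num
  have h2 := (pvBack_inv arr n hn0 hn n.toNat 0 (by omega)).1
  simp only [Nat.cast_zero] at h2
  rw [h1, h2]
  simp


theorem pv_getD_set_ne (l : List Int) (i m : Nat) (v : Int) (h : i ≠ m) :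
    (l.set i v).getD m 0 = l.getD m 0 := by
  simp [List.getD_eq_getElem?_getD, h]

theorem pv_getD_set_self (l : List Int) (i : Nat) (v : Int) (h : i < l.length) :
    (l.set i v).getD i 0 = v := by
  simp [List.getD_eq_getElem?_getD, h]

-- the while-pop loop of the first pass keeps nge's length, keeps its entries in {-1} ∪ [0,n),
-- and only pops from the stack
theorem pvAWhile_inv (arr : List Int) (n i : Int) (hi : 0 ≤ i ∧ i < n) :
    ∀ (st nge : List Int), nge.length = n.toNat → (∀ g ∈ nge, g = -1 ∨ (0 ≤ g ∧ g < n)) →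
      (∀ t ∈ st, 0 ≤ t ∧ t < n) →
      ((pvAWhile arr i nge st).1.length = n.toNat
        ∧ (∀ g ∈ (pvAWhile arr i nge st).1, g = -1 ∨ (0 ≤ g ∧ g < n))
        ∧ (∀ t ∈ (pvAWhile arr i nge st).2, t ∈ st)) := by
  intro st
  induction st with
  | nil =>
      intro nge h1 h2 _
      exact ⟨h1, h2, fun t ht => ht⟩
  | cons t st ih =>
      intro nge h1 h2 hst
      rw [pvAWhile]
      split_ifs with hc
      · have ht := hst t (by simp)
        have hset_len : (PySem.List.pySetD nge t i).length = n.toNat := by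
          rw [PySem.List.pySetD_of_nonneg nge i ht.1]
          simp [h1]
        have hset_mem : ∀ g ∈ PySem.List.pySetD nge t i, g = -1 ∨ (0 ≤ g ∧ g < n) := by
          intro g hg
          rw [PySem.List.pySetD_of_nonneg nge i ht.1] at hg
          rcases List.mem_or_eq_of_mem_set hg with h | h
          · exact h2 g h
          · right; exact h ▸ hi
        obtain ⟨c1, c2, c3⟩ := ih (PySem.List.pySetD nge t i) hset_len hset_mem
          (fun t' ht' => hst t' (List.mem_cons_of_mem _ ht'))
        exact ⟨c1, c2, fun t' ht' => List.mem_cons_of_mem _ (c3 t' ht')⟩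
      · exact ⟨h1, h2, fun t' ht' => ht'⟩

theorem pvANge_inv (arr : List Int) (n : Int) :
    (pvANge arr n).length = n.toNat ∧ ∀ g ∈ pvANge arr n, g = -1 ∨ (0 ≤ g ∧ g < n) := by
  suffices h : ∀ (L : List Int), (∀ i ∈ L, 0 ≤ i ∧ i < n) →
      ∀ (s : List Int × List Int), s.1.length = n.toNat →
        (∀ g ∈ s.1, g = -1 ∨ (0 ≤ g ∧ g < n)) → (∀ t ∈ s.2, 0 ≤ t ∧ t < n) →
        ((L.foldl (fun s i => let s' := pvAWhile arr i s.1 s.2; (s'.1, i :: s'.2)) s).1.length = n.toNat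
          ∧ ∀ g ∈ (L.foldl (fun s i => let s' := pvAWhile arr i s.1 s.2; (s'.1, i :: s'.2)) s).1,
              g = -1 ∨ (0 ≤ g ∧ g < n)) by
    unfold pvANge
    exact h _ (fun i hi => by simpa using (PySem.List.mem_pyRange_one).1 hi)
      (List.replicate n.toNat (-1), []) (by simp) (fun g hg => by left; exact List.eq_of_mem_replicate hg)
      (by simp)
  intro L
  induction L with
  | nil =>
      intro _ s h1 h2 _
      exact ⟨h1, h2⟩
  | cons i L ihL =>
      intro hmem s h1 h2 h3
      rw [List.foldl_cons]
      obtain ⟨c1, c2, c3⟩ := pvAWhile_inv arr n i (hmem i (by simp)) s.2 s.1 h1 h2 h3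
      exact ihL (fun i' hi' => hmem i' (List.mem_cons_of_mem _ hi')) _ c1 c2
        (fun t ht => by
          rcases List.mem_cons.1 ht with h | h
          · exact h ▸ hmem i (by simp)
          · exact h3 t (c3 t h))

-- A's inner linear scan computes pvFirstLt over the suffix (writing it at index i when found)
theorem pvAScan_char (arr : List Int) (n : Int) (hn0 : 0 ≤ n) (hn : n ≤ (arr.length : Int))
    (J : Nat) (hJ : J < n.toNat) (res : List Int) (i : Int) :
    ∀ (k m : Nat), m + k = n.toNat →
      pvAScan arr (J : Int) res i (PySem.List.pyRange (m : Int) n 1)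
        = if pvHasLt ((arr.take n.toNat).getD J 0) ((arr.take n.toNat).drop m)
          then PySem.List.pySetD res i
            (pvFirstLt ((arr.take n.toNat).getD J 0) ((arr.take n.toNat).drop m))
          else res := by
  have hNlen : n.toNat ≤ arr.length := by omega
  have hlen : (arr.take n.toNat).length = n.toNat := by simp; omega
  have hxJ : PySem.List.pyGetD arr (J : Int) 0 = (arr.take n.toNat).getD J 0 := by
    rw [PySem.List.pyGetD_natCast, pv_take_getD arr n.toNat J hJ hNlen]
  intro k
  induction k with
  | zero =>
      intro m hm
      have h1 : PySem.List.pyRange (m : Int) n 1 = [] := PySem.List.pyRange_one_eq_nil (by omega)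
      have h2 : (arr.take n.toNat).drop m = [] := List.drop_eq_nil_of_le (by omega)
      rw [h1, h2]
      simp [pvAScan, pvHasLt]
  | succ k ih =>
      intro m hm
      have hmN : m < n.toNat := by omega
      have hcast : ((m : Int) + 1) = ((m + 1 : Nat) : Int) := by push_cast; ring
      have h1 : PySem.List.pyRange (m : Int) n 1
          = (m : Int) :: PySem.List.pyRange ((m + 1 : Nat) : Int) n 1 := by
        rw [PySem.List.pyRange_one_cons (by omega), hcast]
      have hxm : PySem.List.pyGetD arr (m : Int) 0 = (arr.take n.toNat).getD m 0 := by
        rw [PySem.List.pyGetD_natCast, pv_take_getD arr n.toNat m hmN hNlen]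
      have hdrop : (arr.take n.toNat).drop m
          = (arr.take n.toNat).getD m 0 :: (arr.take n.toNat).drop (m + 1) := by
        rw [List.getD_eq_getElem _ _ (by omega), List.drop_eq_getElem_cons (by omega)]
      rw [h1, pvAScan, hxm, hxJ, hdrop]
      by_cases hc : (arr.take n.toNat).getD m 0 < (arr.take n.toNat).getD J 0
      · have hh : pvHasLt ((arr.take n.toNat).getD J 0)
            ((arr.take n.toNat).getD m 0 :: (arr.take n.toNat).drop (m + 1)) = true := by
          rw [pvHasLt_cons, decide_eq_true hc, Bool.true_or]
        rw [if_pos hc, pvFirstLt_cons_lt _ hc, if_pos hh]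
      · have hh : pvHasLt ((arr.take n.toNat).getD J 0)
            ((arr.take n.toNat).getD m 0 :: (arr.take n.toNat).drop (m + 1))
            = pvHasLt ((arr.take n.toNat).getD J 0) ((arr.take n.toNat).drop (m + 1)) := by
          rw [pvHasLt_cons, decide_eq_false hc, Bool.false_or]
        rw [if_neg hc, ih (m + 1) (by omega), pvFirstLt_cons_ge _ hc, hh]

-- A's second loop fills position m with pvF(nge[m]) and touches nothing below its start
theorem pvPass2_char (arr : List Int) (n : Int) (hn0 : 0 ≤ n) (hn : n ≤ (arr.length : Int))
    (nge : List Int) (hglen : nge.length = n.toNat)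
    (hgmem : ∀ g ∈ nge, g = -1 ∨ (0 ≤ g ∧ g < n)) :
    ∀ (k a : Nat), a + k = n.toNat →
    ∀ res : List Int, res.length = n.toNat →
      (∀ m : Nat, a ≤ m → m < n.toNat → res.getD m 0 = -1) →
      (((PySem.List.pyRange (a : Int) n 1).foldl (pvAStep arr n nge) res).length = n.toNat
        ∧ ∀ m : Nat, m < n.toNat →
            ((PySem.List.pyRange (a : Int) n 1).foldl (pvAStep arr n nge) res).getD m 0
              = if a ≤ m then pvF arr n (nge.getD m (-1)) else res.getD m 0) := by
  intro k
  induction k with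
  | zero =>
      intro a ha res hres hres2
      have h1 : PySem.List.pyRange (a : Int) n 1 = [] := PySem.List.pyRange_one_eq_nil (by omega)
      rw [h1]
      refine ⟨hres, fun m hm => ?_⟩
      rw [List.foldl_nil, if_neg (by omega)]
  | succ k ih =>
      intro a ha res hres hres2
      have haN : a < n.toNat := by omega
      have hcast : ((a : Int) + 1) = ((a + 1 : Nat) : Int) := by push_cast; ring
      have h1 : PySem.List.pyRange (a : Int) n 1
          = (a : Int) :: PySem.List.pyRange ((a + 1 : Nat) : Int) n 1 := by
        rw [PySem.List.pyRange_one_cons (by omega), hcast]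
      have hga : nge.getD a (-1) ∈ nge := by
        rw [List.getD_eq_getElem _ _ (by omega)]
        exact List.getElem_mem _
      by_cases hg : nge.getD a (-1) = -1
      · have hstep : pvAStep arr n nge res (a : Int) = res := by
          simp only [pvAStep, PySem.List.pyGetD_natCast, hg]
          simp
        rw [h1, List.foldl_cons, hstep]
        obtain ⟨c1, c2⟩ := ih (a + 1) (by omega) res hres (fun m hm1 hm2 => hres2 m (by omega) hm2)
        refine ⟨c1, fun m hm => ?_⟩
        rw [c2 m hm]
        by_cases ham' : a + 1 ≤ m
        · rw [if_pos ham', if_pos (by omega)]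
        · by_cases ham : a ≤ m
          · have hma : m = a := by omega
            rw [if_neg ham', if_pos ham, hma, hres2 a (le_refl _) haN, hg, pvF]
            simp
          · rw [if_neg ham', if_neg ham]
      · have hgr := (hgmem _ hga).resolve_left hg
        have hJ : (nge.getD a (-1)).toNat < n.toNat := by omega
        have hgcast : (((nge.getD a (-1)).toNat : Nat) : Int) = nge.getD a (-1) :=
          Int.toNat_of_nonneg hgr.1
        have hgcast1 : nge.getD a (-1) + 1 = (((nge.getD a (-1)).toNat + 1 : Nat) : Int) := by
          push_cast
          omega
        have hscan := pvAScan_char arr n hn0 hn (nge.getD a (-1)).toNat hJ res (a : Int)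
          (n.toNat - ((nge.getD a (-1)).toNat + 1)) ((nge.getD a (-1)).toNat + 1) (by omega)
        have hstep : pvAStep arr n nge res (a : Int)
            = if pvHasLt ((arr.take n.toNat).getD (nge.getD a (-1)).toNat 0)
                  ((arr.take n.toNat).drop ((nge.getD a (-1)).toNat + 1))
              then res.set a (pvFirstLt ((arr.take n.toNat).getD (nge.getD a (-1)).toNat 0)
                  ((arr.take n.toNat).drop ((nge.getD a (-1)).toNat + 1)))
              else res := by
          rw [hgcast] at hscan
          rw [← hgcast1] at hscan
          simp only [pvAStep, PySem.List.pyGetD_natCast]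
          rw [if_pos hg, hscan]
          split_ifs with hlt
          · rw [PySem.List.pySetD_natCast]
          · rfl
        have hlen' : (pvAStep arr n nge res (a : Int)).length = n.toNat := by
          rw [hstep]
          split_ifs <;> simp [hres]
        have hgetm : ∀ m : Nat, m < n.toNat → m ≠ a →
            (pvAStep arr n nge res (a : Int)).getD m 0 = res.getD m 0 := by
          intro m hm hma
          rw [hstep]
          split_ifs with hlt
          · exact pv_getD_set_ne res a m _ (by omega)
          · rfl
        have hgeta : (pvAStep arr n nge res (a : Int)).getD a 0 = pvF arr n (nge.getD a (-1)) := by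
          rw [hstep, pvF, if_neg hg]
          split_ifs with hlt
          · exact pv_getD_set_self res a _ (by omega)
          · rw [hres2 a (le_refl _) haN, pvFirstLt_of_not_hasLt (by simpa using hlt)]
        rw [h1, List.foldl_cons]
        obtain ⟨c1, c2⟩ := ih (a + 1) (by omega) _ hlen'
          (fun m hm1 hm2 => by rw [hgetm m hm2 (by omega)]; exact hres2 m (by omega) hm2)
        refine ⟨c1, fun m hm => ?_⟩
        rw [c2 m hm]
        by_cases ham' : a + 1 ≤ m
        · rw [if_pos ham', if_pos (by omega)]
        · by_cases ham : a ≤ m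
          · have hma : m = a := by omega
            rw [if_neg ham', if_pos ham, hma, hgeta]
          · rw [if_neg ham', if_neg ham, hgetm m hm (by omega)]

-- ===== VERDICT (by name: the statement is the Claim_ definition above) =====
theorem nextSmallerOfNextGreater_spec : Claim_equal_nextSmallerOfNextGreater := by
  intro arr n _ hpre
  have hn : n ≤ (arr.length : Int) := hpre
  unfold Spec_nextSmallerOfNextGreater
  show nextSmallerOfNextGreater arr n = nextSmallerOfNextGreater_alt arr n
  by_cases hn0 : 0 ≤ n
  · obtain ⟨hglen, hgmem⟩ := pvANge_inv arr n
    have hNlen : n.toNat ≤ arr.length := by omega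
    have hlen : (arr.take n.toNat).length = n.toNat := by simp; omega
    obtain ⟨c1, c2⟩ := pvPass2_char arr n hn0 hn (pvANge arr n) hglen hgmem n.toNat 0 (by omega)
      (List.replicate n.toNat (-1)) (by simp)
      (fun m hm1 hm2 => by rw [List.getD_eq_getElem _ _ (by simp; omega)]; simp)
    simp only [Nat.cast_zero] at c1 c2
    unfold nextSmallerOfNextGreater nextSmallerOfNextGreater_alt
    rw [pvNge_eq, pvBBack_eq arr n hn0 hn]
    apply List.ext_getElem
    · rw [c1, List.length_map, hglen]
    · intro m h1 h2
      have hmN : m < n.toNat := by rw [c1] at h1; exact h1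
      have hmg : m < (pvANge arr n).length := by omega
      rw [← List.getD_eq_getElem _ 0 h1, c2 m hmN, if_pos (Nat.zero_le m), List.getElem_map,
        ← List.getD_eq_getElem (pvANge arr n) (-1) hmg]
      have hmem' : (pvANge arr n).getD m (-1) ∈ pvANge arr n := by
        rw [List.getD_eq_getElem (pvANge arr n) (-1) hmg]
        exact List.getElem_mem _
      rcases hgmem _ hmem' with h | h
      · rw [h, pvF]
        simp
      · rw [pvF, if_neg (by omega), if_pos (by omega)]
        have hglt : (pvANge arr n).getD m (-1) < ((pvNsvSpec (arr.take n.toNat)).length : Int) := by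
          rw [length_pvNsvSpec, hlen]
          omega
        rw [PySem.List.pyGetD_eq_getElem _ _ h.1 hglt,
          ← List.getD_eq_getElem (pvNsvSpec (arr.take n.toNat)) 0
            (by rw [length_pvNsvSpec, hlen]; omega),
          pvNsvSpec_getD _ _ (by rw [hlen]; omega)]
  · have h1 : PySem.List.pyRange 0 n 1 = [] := PySem.List.pyRange_one_eq_nil (by omega)
    have h2 : n.toNat = 0 := by omega
    simp only [nextSmallerOfNextGreater, nextSmallerOfNextGreater_alt, pvANge, pvBNge, h1, h2]
    simp
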